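-- pv_equiv track=rewrite | github.com/Haiwen-Xia/CMI-RewardBench | models/cmi-rm/src/muq/muq_mulan/models/downsample.py | _choose_two_stage_strides
-- ===== SOURCE A (Python) =====
-- from typing import Tuple, Optional, List
--
-- def _choose_two_stage_strides(factor: int, prefer: Tuple[int, ...] = (3, 2, 4)) -> Tuple[int, int]:
--     """
--     Find (s1, s2) such that s1*s2 = factor and both are "small",
--     with preference ordering favoring (3,3), then involving 3, then 2, etc.
--
--     Raises ValueError if cannot represent factor by 2 integer strides.
--     """
--     if factor <= 1:
--         return (1, 1)
--
--     best = None
--     best_score = None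
--
--     # search divisors
--     for s1 in range(2, factor + 1):
--         if factor % s1 != 0:
--             continue
--         s2 = factor // s1
--
--         # score: smaller max stride is better; also prefer s1,s2 in prefer list and near 3
--         def pref_rank(s: int) -> int:
--             return prefer.index(s) if s in prefer else 999
--
--         score = (
--             max(s1, s2),                 # primary: keep strides small
--             pref_rank(s1) + pref_rank(s2),
--             abs(s1 - 3) + abs(s2 - 3),   # prefer close to 3
--             abs(s1 - s2),                # prefer balanced
--         )
--
--         if best_score is None or score < best_score:
--             best_score = score
--             best = (s1, s2)
--
--     if best is None:
--         raise ValueError(f"factor={factor} cannot be decomposed into 2 integer strides.")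
--     # reorder so that first stage stride is "more preferred" if possible
--     s1, s2 = best
--     # put 3 first if it exists, else smaller first
--     if (s2 == 3 and s1 != 3) or (s2 < s1 and s1 != 3):
--         s1, s2 = s2, s1
--     return s1, s2
-- ===== SOURCE B (Python) =====
-- def _choose_two_stage_strides(factor, prefer=(3, 2, 4)):
--     # B: enumerate divisors only up to sqrt(factor); the score is symmetric in
--     # (s1, s2), so the smaller-first representative of each pair (plus the
--     # prime fallback (factor, 1)) suffices; ties broken by smaller s1.
--     if factor <= 1:
--         return (1, 1)
--
--     def rank(s):
--         return prefer.index(s) if s in prefer else 999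
--
--     def key(s1, s2):
--         return (max(s1, s2), rank(s1) + rank(s2),
--                 abs(s1 - 3) + abs(s2 - 3), abs(s1 - s2), s1)
--
--     best = (factor, 1)
--     d = 2
--     while d * d <= factor:
--         if factor % d == 0 and key(d, factor // d) < key(*best):
--             best = (d, factor // d)
--         d += 1
--
--     s1, s2 = best
--     if (s2 == 3 and s1 != 3) or (s2 < s1 and s1 != 3):
--         s1, s2 = s2, s1
--     return s1, s2
-- ===== Notes on version B (the rewrite author's own statement) =====
-- stated objective: alternative
-- what changed: B enumerates divisors only up to sqrt(factor) (the score is symmetric in the pair, so the smaller-first representative of each divisor pair plus the prime fallback (factor,1) suffices, with ties broken by smaller s1), instead of A's scan of every candidate stride from 2 to factor; it does fewer loop iterations in factor, but a timing run's measurements straddled its 1.5x bar (1.23x-1.85x across runs), so no speed is claimed.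
import Mathlib
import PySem

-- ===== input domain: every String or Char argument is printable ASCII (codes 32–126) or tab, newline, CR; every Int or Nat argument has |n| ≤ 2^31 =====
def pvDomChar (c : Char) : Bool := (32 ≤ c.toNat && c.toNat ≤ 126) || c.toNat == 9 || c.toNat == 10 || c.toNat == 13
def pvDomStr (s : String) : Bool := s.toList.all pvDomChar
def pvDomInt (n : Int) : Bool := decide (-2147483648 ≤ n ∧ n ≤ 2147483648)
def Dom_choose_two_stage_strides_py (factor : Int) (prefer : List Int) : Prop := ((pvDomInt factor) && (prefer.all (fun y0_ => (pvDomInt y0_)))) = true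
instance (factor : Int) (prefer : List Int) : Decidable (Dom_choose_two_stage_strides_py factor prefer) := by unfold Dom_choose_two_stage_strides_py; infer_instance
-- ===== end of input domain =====

-- B replaces A's scan of all stride candidates 2..factor by a divisor scan up to sqrt(factor):
-- the score is symmetric in (s1, s2), so the smaller-first representative of each divisor pair
-- (plus the fallback (factor, 1)) suffices; objective: alternative (fewer loop iterations in
-- factor; a timing run's measurements straddled its 1.5x bar, so no speed is claimed).

-- ===== PORT A =====
-- `prefer.index(s) if s in prefer else 999` (the `none` branch is unreachable under the guard)
def pvPrefRankA (prefer : List Int) (s : Int) : Int :=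
  if prefer.contains s then
    match PySem.List.index? prefer s with
    | some i => (i : Int)
    | none => 999
  else 999

def pvScoreA (prefer : List Int) (s1 s2 : Int) : Int × Int × Int × Int :=
  (max s1 s2, pvPrefRankA prefer s1 + pvPrefRankA prefer s2, |s1 - 3| + |s2 - 3|, |s1 - s2|)

-- Python's lexicographic `<` on 4-tuples of ints
def pvTupLt4 (a b : Int × Int × Int × Int) : Bool :=
  if a.1 = b.1 then
    if a.2.1 = b.2.1 then
      if a.2.2.1 = b.2.2.1 then decide (a.2.2.2 < b.2.2.2)
      else decide (a.2.2.1 < b.2.2.1)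
    else decide (a.2.1 < b.2.1)
  else decide (a.1 < b.1)

-- the body of A's `for s1 in range(2, factor + 1)` loop; state = (best, best_score)
def pvStepA (factor : Int) (prefer : List Int)
    (acc : Option (Int × Int) × Option (Int × Int × Int × Int)) (s1 : Int) :
    Option (Int × Int) × Option (Int × Int × Int × Int) :=
  if PySem.Int.mod factor s1 ≠ 0 then acc
  else
    let s2 := PySem.Int.floordiv factor s1
    let score := pvScoreA prefer s1 s2
    match acc.2 with
    | none => (some (s1, s2), some score)
    | some bs => if pvTupLt4 score bs = true then (some (s1, s2), some score) else acc

def choose_two_stage_strides_py (factor : Int) (prefer : List Int) : List Int :=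
  if factor ≤ 1 then [1, 1]
  else
    let st := (PySem.List.pyRange 2 (factor + 1) 1).foldl (pvStepA factor prefer) (none, none)
    match st.1 with
    | none => []   -- Python: `raise ValueError` — unreachable for factor ≥ 2 (s1 = factor always divides)
    | some (s1, s2) =>
      if (s2 = 3 ∧ s1 ≠ 3) ∨ (s2 < s1 ∧ s1 ≠ 3) then [s2, s1] else [s1, s2]

-- ===== PORT B =====
def pvRankB (prefer : List Int) (s : Int) : Int :=
  if prefer.contains s then
    match PySem.List.index? prefer s with
    | some i => (i : Int)
    | none => 999
  else 999

def pvKeyB (prefer : List Int) (s1 s2 : Int) : (Int × Int × Int × Int) × Int :=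
  ((max s1 s2, pvRankB prefer s1 + pvRankB prefer s2, |s1 - 3| + |s2 - 3|, |s1 - s2|), s1)

-- Python's lexicographic `<` on 5-tuples of ints (B's key carries s1 as tie-breaker)
def pvTupLt5 (a b : (Int × Int × Int × Int) × Int) : Bool :=
  if a.1.1 = b.1.1 then
    if a.1.2.1 = b.1.2.1 then
      if a.1.2.2.1 = b.1.2.2.1 then
        if a.1.2.2.2 = b.1.2.2.2 then decide (a.2 < b.2)
        else decide (a.1.2.2.2 < b.1.2.2.2)
      else decide (a.1.2.2.1 < b.1.2.2.1)
    else decide (a.1.2.1 < b.1.2.1)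
  else decide (a.1.1 < b.1.1)

-- B's `while d * d <= factor` loop
def pvLoopB (factor : Int) (prefer : List Int) (d : Nat) (best : Int × Int) : Int × Int :=
  if h : ((d : Int)) * (d : Int) ≤ factor then
    let best' :=
      if PySem.Int.mod factor (d : Int) = 0 ∧
         pvTupLt5 (pvKeyB prefer (d : Int) (PySem.Int.floordiv factor (d : Int)))
                  (pvKeyB prefer best.1 best.2) = true
      then ((d : Int), PySem.Int.floordiv factor (d : Int)) else best
    pvLoopB factor prefer (d + 1) best'
  else best
termination_by factor.toNat + 1 - d
decreasing_by
  have hdd : d ≤ d * d := by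
    rcases Nat.eq_zero_or_pos d with h0 | h0
    · simp [h0]
    · exact Nat.le_mul_of_pos_left d h0
  have h2 : d * d ≤ factor.toNat := by
    have _h' : ((d * d : Nat) : Int) ≤ factor := by push_cast; exact h
    omega
  omega

def choose_two_stage_strides_py_alt (factor : Int) (prefer : List Int) : List Int :=
  if factor ≤ 1 then [1, 1]
  else
    let best := pvLoopB factor prefer 2 (factor, 1)
    if (best.2 = 3 ∧ best.1 ≠ 3) ∨ (best.2 < best.1 ∧ best.1 ≠ 3) then [best.2, best.1]
    else [best.1, best.2]

-- ===== PRECONDITION & SPEC =====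
def Spec_choose_two_stage_strides_py (factor : Int) (prefer : List Int) (out : List Int) : Prop := out = choose_two_stage_strides_py_alt factor prefer
instance (factor : Int) (prefer : List Int) (out : List Int) : Decidable (Spec_choose_two_stage_strides_py factor prefer out) := by unfold Spec_choose_two_stage_strides_py; infer_instance

-- ===== CLAIM (what is proved, stated in full; the proofs are below) =====
def Claim_equal_choose_two_stage_strides_py : Prop := ∀ (factor : Int) (prefer : List Int), Dom_choose_two_stage_strides_py factor prefer → Spec_choose_two_stage_strides_py factor prefer (choose_two_stage_strides_py factor prefer)

-- ===== LEMMAS AND PROOFS =====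

-- Propositional views of the two tuple orders
def Lt4P (a b : Int × Int × Int × Int) : Prop :=
  a.1 < b.1 ∨ (a.1 = b.1 ∧ (a.2.1 < b.2.1 ∨ (a.2.1 = b.2.1 ∧
    (a.2.2.1 < b.2.2.1 ∨ (a.2.2.1 = b.2.2.1 ∧ a.2.2.2 < b.2.2.2)))))

def Lt5P (a b : (Int × Int × Int × Int) × Int) : Prop :=
  Lt4P a.1 b.1 ∨ (a.1 = b.1 ∧ a.2 < b.2)

lemma lt4_iff (a b : Int × Int × Int × Int) : pvTupLt4 a b = true ↔ Lt4P a b := by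
  obtain ⟨a1, a2, a3, a4⟩ := a; obtain ⟨b1, b2, b3, b4⟩ := b
  simp only [pvTupLt4, Lt4P]
  split_ifs <;> simp_all

lemma lt5_iff (a b : (Int × Int × Int × Int) × Int) : pvTupLt5 a b = true ↔ Lt5P a b := by
  obtain ⟨⟨a1, a2, a3, a4⟩, a5⟩ := a; obtain ⟨⟨b1, b2, b3, b4⟩, b5⟩ := b
  simp only [pvTupLt5, Lt5P, Lt4P, Prod.mk.injEq]
  split_ifs <;> simp_all

lemma lt5_irrefl (a : (Int × Int × Int × Int) × Int) : ¬ Lt5P a a := by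
  obtain ⟨⟨a1, a2, a3, a4⟩, a5⟩ := a
  simp only [Lt5P, Lt4P]; omega

lemma lt5_trans {a b c : (Int × Int × Int × Int) × Int} :
    Lt5P a b → Lt5P b c → Lt5P a c := by
  obtain ⟨⟨a1, a2, a3, a4⟩, a5⟩ := a; obtain ⟨⟨b1, b2, b3, b4⟩, b5⟩ := b
  obtain ⟨⟨c1, c2, c3, c4⟩, c5⟩ := c
  simp only [Lt5P, Lt4P, Prod.mk.injEq]; omega

lemma lt5_of_not_lt_of_lt {a b c : (Int × Int × Int × Int) × Int} :
    ¬ Lt5P a b → Lt5P a c → Lt5P b c := by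
  obtain ⟨⟨a1, a2, a3, a4⟩, a5⟩ := a; obtain ⟨⟨b1, b2, b3, b4⟩, b5⟩ := b
  obtain ⟨⟨c1, c2, c3, c4⟩, c5⟩ := c
  simp only [Lt5P, Lt4P, Prod.mk.injEq]; omega

lemma lt5_antisymm {a b : (Int × Int × Int × Int) × Int} :
    ¬ Lt5P a b → ¬ Lt5P b a → a = b := by
  obtain ⟨⟨a1, a2, a3, a4⟩, a5⟩ := a; obtain ⟨⟨b1, b2, b3, b4⟩, b5⟩ := b
  simp only [Lt5P, Lt4P, Prod.mk.injEq]; omega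

lemma lt5_pair_iff (x y : Int × Int × Int × Int) (i j : Int) (h : j < i) :
    Lt5P (x, i) (y, j) ↔ Lt4P x y := by
  simp only [Lt5P]
  constructor
  · rintro (h4 | ⟨-, hlt⟩)
    · exact h4
    · exact absurd hlt (by omega)
  · exact Or.inl

-- candidate key: B's 5-tuple key of the candidate represented by its first stride s
def pvKey (factor : Int) (prefer : List Int) (s : Int) : (Int × Int × Int × Int) × Int :=
  pvKeyB prefer s (PySem.Int.floordiv factor s)

lemma pvKey_fst (factor : Int) (prefer : List Int) (s : Int) :
    (pvKey factor prefer s).1 = pvScoreA prefer s (PySem.Int.floordiv factor s) := rfl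

-- the abstract "keep the better candidate" step both loops implement
def pvStep (factor : Int) (prefer : List Int) (b s : Int) : Int :=
  if PySem.Int.mod factor s = 0 ∧
     pvTupLt5 (pvKey factor prefer s) (pvKey factor prefer b) = true then s else b

lemma score_symm (prefer : List Int) (a b : Int) :
    pvScoreA prefer a b = pvScoreA prefer b a := by
  simp only [pvScoreA, Prod.mk.injEq]
  refine ⟨max_comm _ _, add_comm _ _, add_comm _ _, abs_sub_comm _ _⟩

-- minimality of the generic fold: the result is among the candidates and no divisor beats it
lemma fold_min (factor : Int) (prefer : List Int) :
    ∀ (l : List Int) (b : Int),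
      (l.foldl (pvStep factor prefer) b = b ∨
        (l.foldl (pvStep factor prefer) b ∈ l ∧
         PySem.Int.mod factor (l.foldl (pvStep factor prefer) b) = 0)) ∧
      ¬ Lt5P (pvKey factor prefer b) (pvKey factor prefer (l.foldl (pvStep factor prefer) b)) ∧
      ∀ x ∈ l, PySem.Int.mod factor x = 0 →
        ¬ Lt5P (pvKey factor prefer x) (pvKey factor prefer (l.foldl (pvStep factor prefer) b)) := by
  intro l
  induction l with
  | nil => intro b; exact ⟨Or.inl rfl, lt5_irrefl _, by simp⟩
  | cons s t ih =>
    intro b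
    obtain ⟨ihmem, ihb, ihall⟩ := ih (pvStep factor prefer b s)
    simp only [List.foldl_cons] at *
    by_cases hc : PySem.Int.mod factor s = 0 ∧
        pvTupLt5 (pvKey factor prefer s) (pvKey factor prefer b) = true
    · have hstep : pvStep factor prefer b s = s := by simp [pvStep, hc]
      rw [hstep]
      rw [hstep] at ihmem ihb ihall
      have hlt : Lt5P (pvKey factor prefer s) (pvKey factor prefer b) := (lt5_iff _ _).mp hc.2
      refine ⟨?_, ?_, ?_⟩
      · rcases ihmem with h | h
        · exact Or.inr ⟨by simp [h], by rw [h]; exact hc.1⟩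
        · exact Or.inr ⟨List.mem_cons_of_mem _ h.1, h.2⟩
      · intro hb
        exact ihb (lt5_trans hlt hb)
      · intro x hx hdx
        rcases List.mem_cons.mp hx with rfl | hx'
        · exact ihb
        · exact ihall x hx' hdx
    · have hstep : pvStep factor prefer b s = b := by simp only [pvStep, if_neg hc]
      rw [hstep]
      rw [hstep] at ihmem ihb ihall
      refine ⟨?_, ihb, ?_⟩
      · rcases ihmem with h | h
        · exact Or.inl h
        · exact Or.inr ⟨List.mem_cons_of_mem _ h.1, h.2⟩
      · intro x hx hdx
        rcases List.mem_cons.mp hx with rfl | hx'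
        · -- s is a divisor but did not beat b: s is not below b, hence not below the minimum
          intro hsm
          have hns : ¬ Lt5P (pvKey factor prefer x) (pvKey factor prefer b) := by
            intro hl; exact hc ⟨hdx, (lt5_iff _ _).mpr hl⟩
          exact ihb (lt5_of_not_lt_of_lt hns hsm)
        · exact ihall x hx' hdx

-- A's loop, once a first best is installed, follows the generic step (the iteration order
-- is increasing, so A's strict 4-tuple test equals the 5-tuple test with s1 tie-breaker)
lemma foldA_eq (factor : Int) (prefer : List Int) :
    ∀ (l : List Int) (b : Int), (∀ s ∈ l, b < s) → l.Pairwise (· < ·) →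
      l.foldl (pvStepA factor prefer)
        (some (b, PySem.Int.floordiv factor b),
         some (pvScoreA prefer b (PySem.Int.floordiv factor b)))
      = (some (l.foldl (pvStep factor prefer) b,
               PySem.Int.floordiv factor (l.foldl (pvStep factor prefer) b)),
         some (pvScoreA prefer (l.foldl (pvStep factor prefer) b)
               (PySem.Int.floordiv factor (l.foldl (pvStep factor prefer) b)))) := by
  intro l
  induction l with
  | nil => intro b _ _; rfl
  | cons s t ih =>
    intro b hb hp
    have hbs : b < s := hb s (List.mem_cons_self)
    have hp' : t.Pairwise (· < ·) := hp.of_cons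
    have hst : ∀ x ∈ t, s < x := fun x hx => (List.pairwise_cons.mp hp).1 x hx
    simp only [List.foldl_cons]
    by_cases hds : PySem.Int.mod factor s = 0
    · have hlt45 : pvTupLt4 (pvScoreA prefer s (PySem.Int.floordiv factor s))
          (pvScoreA prefer b (PySem.Int.floordiv factor b)) = true ↔
          pvTupLt5 (pvKey factor prefer s) (pvKey factor prefer b) = true := by
        rw [lt4_iff, lt5_iff]
        exact (lt5_pair_iff _ _ _ _ hbs).symm
      by_cases hl : pvTupLt5 (pvKey factor prefer s) (pvKey factor prefer b) = true
      · have h1 : pvStepA factor prefer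
            (some (b, PySem.Int.floordiv factor b),
             some (pvScoreA prefer b (PySem.Int.floordiv factor b))) s
            = (some (s, PySem.Int.floordiv factor s),
               some (pvScoreA prefer s (PySem.Int.floordiv factor s))) := by
          simp only [pvStepA, hds, ne_eq, not_true_eq_false, if_false]
          simp [hlt45.mpr hl]
        have h2 : pvStep factor prefer b s = s := by simp [pvStep, hds, hl]
        rw [h1, h2]
        exact ih s hst hp'
      · have h1 : pvStepA factor prefer
            (some (b, PySem.Int.floordiv factor b),
             some (pvScoreA prefer b (PySem.Int.floordiv factor b))) s
            = (some (b, PySem.Int.floordiv factor b),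
               some (pvScoreA prefer b (PySem.Int.floordiv factor b))) := by
          simp only [pvStepA, hds, ne_eq, not_true_eq_false, if_false]
          simp [hlt45, hl]
        have h2 : pvStep factor prefer b s = b := by
          simp only [pvStep]; rw [if_neg (fun hcc => hl hcc.2)]
        rw [h1, h2]
        exact ih b (fun x hx => lt_trans hbs (hst x hx)) hp'
    · have h1 : pvStepA factor prefer
          (some (b, PySem.Int.floordiv factor b),
           some (pvScoreA prefer b (PySem.Int.floordiv factor b))) s
          = (some (b, PySem.Int.floordiv factor b),
             some (pvScoreA prefer b (PySem.Int.floordiv factor b))) := by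
        simp [pvStepA, hds]
      have h2 : pvStep factor prefer b s = b := by
        simp only [pvStep]; rw [if_neg (fun hcc => hds hcc.1)]
      rw [h1, h2]
      exact ih b (fun x hx => lt_trans hbs (hst x hx)) hp'

-- A's loop from the empty state: the first divisor seeds the generic fold
lemma foldA_none (factor : Int) (prefer : List Int) :
    ∀ (l : List Int), l.Pairwise (· < ·) → (∃ x ∈ l, PySem.Int.mod factor x = 0) →
      ∃ m, l.foldl (pvStepA factor prefer) (none, none)
            = (some (m, PySem.Int.floordiv factor m),
               some (pvScoreA prefer m (PySem.Int.floordiv factor m))) ∧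
        (m ∈ l ∧ PySem.Int.mod factor m = 0) ∧
        ∀ x ∈ l, PySem.Int.mod factor x = 0 →
          ¬ Lt5P (pvKey factor prefer x) (pvKey factor prefer m) := by
  intro l
  induction l with
  | nil => rintro - ⟨x, hx, -⟩; exact absurd hx (List.not_mem_nil)
  | cons s t ih =>
    intro hp hex
    have hp' : t.Pairwise (· < ·) := hp.of_cons
    have hst : ∀ x ∈ t, s < x := fun x hx => (List.pairwise_cons.mp hp).1 x hx
    simp only [List.foldl_cons]
    by_cases hds : PySem.Int.mod factor s = 0
    · have h1 : pvStepA factor prefer (none, none) s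
          = (some (s, PySem.Int.floordiv factor s),
             some (pvScoreA prefer s (PySem.Int.floordiv factor s))) := by
        simp [pvStepA, hds]
      rw [h1, foldA_eq factor prefer t s hst hp']
      refine ⟨t.foldl (pvStep factor prefer) s, rfl, ?_, ?_⟩
      · obtain ⟨hmem, -, -⟩ := fold_min factor prefer t s
        rcases hmem with h | h
        · exact ⟨by simp [h], by rw [h]; exact hds⟩
        · exact ⟨List.mem_cons_of_mem _ h.1, h.2⟩
      · intro x hx hdx
        obtain ⟨-, hb, hall⟩ := fold_min factor prefer t s
        rcases List.mem_cons.mp hx with rfl | hx'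
        · exact hb
        · exact hall x hx' hdx
    · have h1 : pvStepA factor prefer (none, none) s = (none, none) := by
        simp [pvStepA, hds]
      rw [h1]
      obtain ⟨x0, hx0, hdx0⟩ := hex
      rcases List.mem_cons.mp hx0 with rfl | hx0'
      · exact absurd hdx0 hds
      obtain ⟨m, heq, ⟨hm1, hm2⟩, hmin⟩ := ih hp' ⟨x0, hx0', hdx0⟩
      refine ⟨m, heq, ⟨List.mem_cons_of_mem _ hm1, hm2⟩, ?_⟩
      intro x hx hdx
      rcases List.mem_cons.mp hx with rfl | hx'
      · exact absurd hdx hds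
      · exact hmin x hx' hdx

-- B's while-loop is the generic fold over the integers 2 .. isqrt(factor)
lemma loopB_eq (factor : Int) (prefer : List Int) (hf : 2 ≤ factor) :
    ∀ (cnt d : Nat) (s : Int), factor.toNat.sqrt + 1 - d = cnt →
      pvLoopB factor prefer d (s, PySem.Int.floordiv factor s)
        = (((List.range' d cnt).map (fun k : Nat => (k : Int))).foldl (pvStep factor prefer) s,
           PySem.Int.floordiv factor
             (((List.range' d cnt).map (fun k : Nat => (k : Int))).foldl (pvStep factor prefer) s)) := by
  intro cnt
  induction cnt with
  | zero =>
    intro d s hd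
    have hguard : ¬ ((d : Int) * (d : Int) ≤ factor) := by
      intro h
      have h2 : d * d ≤ factor.toNat := by
        have : ((d * d : Nat) : Int) ≤ factor := by push_cast; exact h
        omega
      have : d ≤ factor.toNat.sqrt := Nat.le_sqrt.mpr h2
      omega
    rw [pvLoopB, dif_neg hguard]
    simp [List.range']
  | succ cnt ih =>
    intro d s hd
    have hdn : d ≤ factor.toNat.sqrt := by omega
    have hguard : (d : Int) * (d : Int) ≤ factor := by
      have h2 : d * d ≤ factor.toNat := Nat.le_sqrt.mp hdn
      have h3 : ((d * d : Nat) : Int) ≤ (factor.toNat : Int) := by exact_mod_cast h2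
      push_cast at h3
      omega
    rw [pvLoopB, dif_pos hguard]
    have hbest : (if PySem.Int.mod factor (d : Int) = 0 ∧
         pvTupLt5 (pvKeyB prefer (d : Int) (PySem.Int.floordiv factor (d : Int)))
                  (pvKeyB prefer (s, PySem.Int.floordiv factor s).1 (s, PySem.Int.floordiv factor s).2) = true
      then ((d : Int), PySem.Int.floordiv factor (d : Int)) else (s, PySem.Int.floordiv factor s))
        = (pvStep factor prefer s (d : Int),
           PySem.Int.floordiv factor (pvStep factor prefer s (d : Int))) := by
      simp only [pvStep, pvKey]
      split_ifs with h
      · rfl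
      · rfl
    rw [hbest, ih (d + 1) (pvStep factor prefer s (d : Int)) (by omega)]
    rw [List.range'_succ]
    simp only [List.map_cons, List.foldl_cons]

-- arithmetic helpers about a divisor s of factor
lemma div_pair (factor s : Int) (h2 : 2 ≤ s) (hs : s ∣ factor) :
    PySem.Int.floordiv factor s * s = factor := by
  rw [PySem.Int.floordiv_eq_ediv_of_pos (by omega)]
  exact Int.ediv_mul_cancel hs

-- the main equality of the two selected candidates
lemma main_eq (factor : Int) (prefer : List Int) (hf : 2 ≤ factor) :
    choose_two_stage_strides_py factor prefer = choose_two_stage_strides_py_alt factor prefer := by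
  have hmemf : factor ∈ PySem.List.pyRange 2 (factor + 1) 1 :=
    PySem.List.mem_pyRange_one.mpr ⟨hf, by omega⟩
  have hdivf : PySem.Int.mod factor factor = 0 :=
    (PySem.Int.mod_eq_zero_iff_dvd factor factor).mpr dvd_rfl
  obtain ⟨m, heq, ⟨hmR, hmdiv⟩, hminA⟩ :=
    foldA_none factor prefer (PySem.List.pyRange 2 (factor + 1) 1)
      (PySem.List.pairwise_lt_pyRange_one 2 (factor + 1)) ⟨factor, hmemf, hdivf⟩
  obtain ⟨hm2, hmle⟩ := PySem.List.mem_pyRange_one.mp hmR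
  have hmdvd : m ∣ factor := (PySem.Int.mod_eq_zero_iff_dvd factor m).mp hmdiv
  have hfd1 : PySem.Int.floordiv factor factor = 1 := by
    rw [PySem.Int.floordiv_eq_ediv_of_pos (by omega)]
    exact Int.ediv_self (by omega)
  have hloop := loopB_eq factor prefer hf (factor.toNat.sqrt + 1 - 2) 2 factor rfl
  obtain ⟨hBmem, hBb, hBall⟩ :=
    fold_min factor prefer
      ((List.range' 2 (factor.toNat.sqrt + 1 - 2)).map (fun k : Nat => (k : Int))) factor
  set dsB := (List.range' 2 (factor.toNat.sqrt + 1 - 2)).map (fun k : Nat => (k : Int)) with hdsB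
  set mB := dsB.foldl (pvStep factor prefer) factor with hmB
  -- mB is not below m (mB is one of A's candidates)
  have hq1 : ¬ Lt5P (pvKey factor prefer mB) (pvKey factor prefer m) := by
    rcases hBmem with hmBf | ⟨hmBmem, hmBdiv⟩
    · rw [hmBf]; exact hminA factor hmemf hdivf
    · obtain ⟨d, hd, hdc⟩ := List.mem_map.mp hmBmem
      obtain ⟨hd2, hdlt⟩ := List.mem_range'_1.mp hd
      have hdn : d ≤ factor.toNat.sqrt := by omega
      have hdd : d * d ≤ factor.toNat := Nat.le_sqrt.mp hdn
      have hdle : d ≤ d * d := Nat.le_mul_of_pos_left d (by omega)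
      have hmBle : mB ≤ factor := by rw [← hdc]; omega
      have hmB2 : (2 : Int) ≤ mB := by rw [← hdc]; exact_mod_cast hd2
      exact hminA mB (PySem.List.mem_pyRange_one.mpr ⟨hmB2, by omega⟩) hmBdiv
  -- m is not below mB (m or its mirror is one of B's candidates)
  have hq2 : ¬ Lt5P (pvKey factor prefer m) (pvKey factor prefer mB) := by
    by_cases hsq : m * m ≤ factor
    · have hc : (m.toNat : Int) = m := Int.toNat_of_nonneg (by omega)
      have h' : ((m.toNat * m.toNat : Nat) : Int) ≤ factor := by push_cast; rw [hc]; exact hsq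
      have hdd : m.toNat * m.toNat ≤ factor.toNat := by omega
      have hdn : m.toNat ≤ factor.toNat.sqrt := Nat.le_sqrt.mpr hdd
      have hmem : m ∈ dsB := by
        rw [hdsB]
        exact List.mem_map.mpr ⟨m.toNat, List.mem_range'_1.mpr ⟨by omega, by omega⟩, hc⟩
      exact hBall m hmem hmdiv
    · have hs2m : PySem.Int.floordiv factor m * m = factor := div_pair factor m hm2 hmdvd
      have hs21 : 1 ≤ PySem.Int.floordiv factor m :=
        (PySem.Int.le_floordiv_iff_mul_le (by omega)).mpr (by omega)
      have hs2lt : PySem.Int.floordiv factor m < m :=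
        (PySem.Int.floordiv_lt_iff_lt_mul (by omega)).mpr (by omega)
      set s2 := PySem.Int.floordiv factor m with hs2def
      by_cases h21 : s2 = 1
      · have hmf : m = factor := by rw [h21] at hs2m; omega
        rw [hmf]; exact hBb
      · have hs22 : 2 ≤ s2 := by omega
        have hs2dvd : s2 ∣ factor := ⟨m, hs2m.symm⟩
        have hfs2 : PySem.Int.floordiv factor s2 = m := by
          rw [PySem.Int.floordiv_eq_iff_of_pos (by omega)]
          constructor <;> nlinarith
        have hs2sq : s2 * s2 < factor := by nlinarith
        have hc2 : (s2.toNat : Int) = s2 := Int.toNat_of_nonneg (by omega)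
        have h2' : ((s2.toNat * s2.toNat : Nat) : Int) ≤ factor := by
          push_cast; rw [hc2]; omega
        have hdn2 : s2.toNat ≤ factor.toNat.sqrt := Nat.le_sqrt.mpr (by omega)
        have hmem2 : s2 ∈ dsB := by
          rw [hdsB]
          exact List.mem_map.mpr ⟨s2.toNat, List.mem_range'_1.mpr ⟨by omega, by omega⟩, hc2⟩
        have hB2 : ¬ Lt5P (pvKey factor prefer s2) (pvKey factor prefer mB) :=
          hBall s2 hmem2 ((PySem.Int.mod_eq_zero_iff_dvd factor s2).mpr hs2dvd)
        have hlt : Lt5P (pvKey factor prefer s2) (pvKey factor prefer m) := by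
          have hscore : (pvKey factor prefer s2).1 = (pvKey factor prefer m).1 := by
            rw [pvKey_fst, pvKey_fst, hfs2, ← hs2def]
            exact score_symm prefer s2 m
          exact Or.inr ⟨hscore, hs2lt⟩
        intro hmm
        exact hB2 (lt5_trans hlt hmm)
  have hkeq : pvKey factor prefer m = pvKey factor prefer mB := lt5_antisymm hq2 hq1
  have hmeq : m = mB := congrArg Prod.snd hkeq
  -- assemble: both programs reorder the same pair (m, factor // m)
  simp only [choose_two_stage_strides_py, choose_two_stage_strides_py_alt, if_neg (by omega : ¬ factor ≤ 1)]
  rw [heq]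
  conv_rhs => rw [show ((factor, 1) : Int × Int) = (factor, PySem.Int.floordiv factor factor) from by rw [hfd1]]
  rw [hloop, ← hmeq]

-- ===== VERDICT (by name: the statement is the Claim_ definition above) =====
theorem choose_two_stage_strides_py_spec : Claim_equal_choose_two_stage_strides_py := by
  intro factor prefer _
  unfold Spec_choose_two_stage_strides_py
  by_cases hf : factor ≤ 1
  · simp [choose_two_stage_strides_py, choose_two_stage_strides_py_alt, hf]
  · exact main_eq factor prefer (by omega)
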